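-- pv_equiv track=rewrite | github.com/PatrykRybak-MateuszKitzol/syntax-aware-language-model-for-code-generation | segmentation/code_segmentation.py | extract_single_line_span
-- ===== SOURCE A (Python) =====
-- from typing import List, Tuple, Optional
--
-- def extract_single_line_span(tokens: List[str], keyword_tag: str) -> List[Tuple[int, int]]:
--     spans = []
--     i = 0
--     while i < len(tokens):
--         if tokens[i] == keyword_tag:
--             start = i
--             end = i + 1
--             while end < len(tokens) and tokens[end] != "[NEW_LINE]":
--                 end += 1
--             spans.append((start, end))
--             i = end
--         else:
--             i += 1
--     return spans
-- ===== SOURCE B (Python) =====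
-- def extract_single_line_span(tokens, keyword_tag):
--     spans = []
--     start = None
--     for i, tok in enumerate(tokens):
--         if start is not None and tok == "[NEW_LINE]":
--             spans.append((start, i))
--             start = None
--         if start is None and tok == keyword_tag:
--             start = i
--     if start is not None:
--         spans.append((start, len(tokens)))
--     return spans
-- ===== Notes on version B (the rewrite author's own statement) =====
-- stated objective: simpler
-- what changed: Replaced A's nested while loops with index jumps (inner scan to the next newline, then i = end) by a single flat pass over the tokens that maintains an open-span state variable (close-then-open on each token, flush at end of list).
import Mathlib
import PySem

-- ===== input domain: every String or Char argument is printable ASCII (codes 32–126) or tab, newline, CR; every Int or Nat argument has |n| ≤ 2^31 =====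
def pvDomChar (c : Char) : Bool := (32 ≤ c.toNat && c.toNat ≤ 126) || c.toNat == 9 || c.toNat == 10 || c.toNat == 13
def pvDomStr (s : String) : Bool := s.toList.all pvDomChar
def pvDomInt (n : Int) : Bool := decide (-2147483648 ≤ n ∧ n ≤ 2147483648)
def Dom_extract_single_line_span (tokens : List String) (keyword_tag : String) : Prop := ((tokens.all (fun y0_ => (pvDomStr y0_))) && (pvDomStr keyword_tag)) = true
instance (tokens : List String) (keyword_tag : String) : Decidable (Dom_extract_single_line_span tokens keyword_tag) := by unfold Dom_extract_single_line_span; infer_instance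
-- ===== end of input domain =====

-- B replaces A's nested while/index-jump scan by one flat pass with an open-span state variable; objective: simpler.

-- ===== PORT A =====
-- inner 'while end < len(tokens) and tokens[end] != "[NEW_LINE]": end += 1'
def pvInnerA (tokens : List String) (e : Nat) : Nat :=
  if h : e < tokens.length then
    if tokens[e] ≠ "[NEW_LINE]" then pvInnerA tokens (e + 1) else e
  else e
termination_by tokens.length - e

-- the port's outer loop needs this for termination (i = end ≥ i + 1)
theorem pvInnerA_ge (tokens : List String) (e : Nat) : e ≤ pvInnerA tokens e := by
  fun_induction pvInnerA tokens e <;> omega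

-- outer 'while i < len(tokens): …'
def pvOuterA (tokens : List String) (kw : String) (i : Nat) (spans : List (Int × Int)) :
    List (Int × Int) :=
  if h : i < tokens.length then
    if tokens[i] = kw then
      pvOuterA tokens kw (pvInnerA tokens (i + 1))
        (spans ++ [((i : Int), ((pvInnerA tokens (i + 1)) : Int))])
    else pvOuterA tokens kw (i + 1) spans
  else spans
termination_by tokens.length - i
decreasing_by
  · have := pvInnerA_ge tokens (i + 1); omega
  · omega

def extract_single_line_span (tokens : List String) (keyword_tag : String) : List (Int × Int) :=
  pvOuterA tokens keyword_tag 0 []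

-- ===== PORT B =====
-- the 'for i, tok in enumerate(tokens)' body: close an open span on "[NEW_LINE]", then
-- possibly open one at the current token; the [] case is the post-loop flush.
def pvAltLoop (kw : String) (l : List String) (i : Nat) (start : Option Nat)
    (spans : List (Int × Int)) : List (Int × Int) :=
  match l with
  | [] =>
    match start with
    | some s => spans ++ [((s : Int), (i : Int))]
    | none => spans
  | t :: rest =>
    match start with
    | some s =>
      if t = "[NEW_LINE]" then
        pvAltLoop kw rest (i + 1) (if t = kw then some i else none)
          (spans ++ [((s : Int), (i : Int))])
      else pvAltLoop kw rest (i + 1) (some s) spans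
    | none =>
      pvAltLoop kw rest (i + 1) (if t = kw then some i else none) spans

def extract_single_line_span_alt (tokens : List String) (keyword_tag : String) :
    List (Int × Int) :=
  pvAltLoop keyword_tag tokens 0 none []

-- ===== PRECONDITION & SPEC =====
def Spec_extract_single_line_span (tokens : List String) (keyword_tag : String) (out : List (Int × Int)) : Prop := out = extract_single_line_span_alt tokens keyword_tag
instance (tokens : List String) (keyword_tag : String) (out : List (Int × Int)) : Decidable (Spec_extract_single_line_span tokens keyword_tag out) := by unfold Spec_extract_single_line_span; infer_instance

-- ===== CLAIM (what is proved, stated in full; the proofs are below) =====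
def Claim_equal_extract_single_line_span : Prop := ∀ (tokens : List String) (keyword_tag : String), Dom_extract_single_line_span tokens keyword_tag → Spec_extract_single_line_span tokens keyword_tag (extract_single_line_span tokens keyword_tag)

-- ===== LEMMAS AND PROOFS =====

theorem pvInnerA_le (tokens : List String) (e : Nat) (he : e ≤ tokens.length) :
    pvInnerA tokens e ≤ tokens.length := by
  fun_induction pvInnerA tokens e <;> omega

theorem pvInnerA_stop (tokens : List String) (e : Nat) (h : e < tokens.length)
    (ht : tokens[e] = "[NEW_LINE]") : pvInnerA tokens e = e := by
  unfold pvInnerA; simp [h, ht]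

theorem pvInnerA_step (tokens : List String) (e : Nat) (h : e < tokens.length)
    (ht : tokens[e] ≠ "[NEW_LINE]") : pvInnerA tokens e = pvInnerA tokens (e + 1) := by
  conv_lhs => rw [pvInnerA]
  simp [h, ht]

-- while B's span is open at index i it scans to the first newline at e = pvInnerA i,
-- closes there (re-checking token e with a closed state), or flushes at end of list
theorem pvAltLoop_open (tokens : List String) (kw : String) :
    ∀ n i s spans, tokens.length - i = n → i ≤ tokens.length →
      pvAltLoop kw (tokens.drop i) i (some s) spans =
        (if pvInnerA tokens i < tokens.length then
          pvAltLoop kw (tokens.drop (pvInnerA tokens i)) (pvInnerA tokens i) none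
            (spans ++ [((s : Int), ((pvInnerA tokens i) : Int))])
        else spans ++ [((s : Int), ((tokens.length : Nat) : Int))]) := by
  intro n
  induction n with
  | zero =>
    intro i s spans hn hi
    have hi' : i = tokens.length := by omega
    subst hi'
    have hdrop : tokens.drop tokens.length = [] := List.drop_of_length_le (le_refl _)
    have hinner : pvInnerA tokens tokens.length = tokens.length := by
      unfold pvInnerA; simp
    rw [hdrop, hinner]
    simp [pvAltLoop]
  | succ m ih =>
    intro i s spans hn hi
    have hlt : i < tokens.length := by omega
    have hdrop : tokens.drop i = tokens[i] :: tokens.drop (i + 1) :=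
      (List.getElem_cons_drop hlt).symm
    by_cases ht : tokens[i] = "[NEW_LINE]"
    · have hinner : pvInnerA tokens i = i := pvInnerA_stop tokens i hlt ht
      rw [hdrop, hinner]
      simp only [pvAltLoop, ht, if_pos hlt, reduceIte]
      rw [hdrop]
      simp [pvAltLoop, ht]
    · have hinner : pvInnerA tokens i = pvInnerA tokens (i + 1) :=
        pvInnerA_step tokens i hlt ht
      rw [hdrop, hinner]
      simp only [pvAltLoop, ht, reduceIte]
      exact ih (i + 1) s spans (by omega) (by omega)

-- with no open span, B's flat pass from index i computes exactly A's outer loop from i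
theorem pvAltLoop_closed (tokens : List String) (kw : String) :
    ∀ n i spans, tokens.length - i = n →
      pvAltLoop kw (tokens.drop i) i none spans = pvOuterA tokens kw i spans := by
  intro n
  induction n using Nat.strong_induction_on with
  | _ n ih =>
    intro i spans hn
    by_cases hlt : i < tokens.length
    · have hdrop : tokens.drop i = tokens[i] :: tokens.drop (i + 1) :=
        (List.getElem_cons_drop hlt).symm
      by_cases hkw : tokens[i] = kw
      · rw [hdrop]
        simp only [pvAltLoop, hkw, reduceIte]
        rw [pvAltLoop_open tokens kw (tokens.length - (i + 1)) (i + 1) i spans rfl (by omega)]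
        rw [pvOuterA]
        simp only [hlt, dif_pos, hkw, reduceIte]
        set e := pvInnerA tokens (i + 1) with he
        have hge : i + 1 ≤ e := pvInnerA_ge tokens (i + 1)
        have hle : e ≤ tokens.length := pvInnerA_le tokens (i + 1) (by omega)
        by_cases helt : e < tokens.length
        · rw [if_pos helt]
          exact ih (tokens.length - e) (by omega) e _ rfl
        · rw [if_neg helt]
          have heq : e = tokens.length := by omega
          rw [pvOuterA]
          simp [heq]
      · rw [hdrop]
        simp only [pvAltLoop, hkw, reduceIte]
        rw [pvOuterA]
        simp only [hlt, dif_pos, hkw, reduceIte]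
        exact ih (tokens.length - (i + 1)) (by omega) (i + 1) spans rfl
    · have hdrop : tokens.drop i = [] := List.drop_of_length_le (by omega)
      rw [hdrop, pvOuterA]
      simp [pvAltLoop, hlt]

-- ===== VERDICT (by name: the statement is the Claim_ definition above) =====
theorem extract_single_line_span_spec : Claim_equal_extract_single_line_span := by
  intro tokens kw _
  unfold Spec_extract_single_line_span extract_single_line_span extract_single_line_span_alt
  have := pvAltLoop_closed tokens kw (tokens.length - 0) 0 [] rfl
  simpa using this.symm
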